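-- pv_equiv track=rewrite | github.com/SanciaX/P6_Bus_Routes_Fixer | source_code/scenario_management_helper.py | _merge_close_nodes
-- ===== SOURCE A (Python) =====
-- def _merge_close_nodes(error_node_pairs_indices):
--     '''
--     Merge node pairs that are close to each other (within 10 nodes)
--     The purpose is to avoid the shortest path searching to be too frequent
--     '''
--     i = 0
--     while i < len(error_node_pairs_indices)-1:
--         if error_node_pairs_indices[i+1][1] - error_node_pairs_indices[i][0] < 10:
--             error_node_pairs_indices = error_node_pairs_indices[:i] + [(error_node_pairs_indices[i][0], error_node_pairs_indices[i+1][1])] + error_node_pairs_indices[i + 2:]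
--             ## Restart checking from the merged pair
--             i -= 1
--         i += 1
--     return error_node_pairs_indices
-- ===== SOURCE B (Python) =====
-- def _merge_close_nodes(error_node_pairs_indices):
--     '''
--     Same merging in one greedy left-to-right pass: extend the last group in
--     the output instead of rebuilding the whole list and restarting.
--     '''
--     merged = []
--     for pair in error_node_pairs_indices:
--         if merged and pair[1] - merged[-1][0] < 10:
--             merged[-1] = (merged[-1][0], pair[1])
--         else:
--             merged.append(pair)
--     return merged
-- ===== Notes on version B (the rewrite author's own statement) =====
-- stated objective: simpler
-- what changed: A repeatedly rebuilds the whole list by slicing and re-checks after every merge; B makes one greedy left-to-right pass over the pairs, extending the last group of an output list in place.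
import Mathlib
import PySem

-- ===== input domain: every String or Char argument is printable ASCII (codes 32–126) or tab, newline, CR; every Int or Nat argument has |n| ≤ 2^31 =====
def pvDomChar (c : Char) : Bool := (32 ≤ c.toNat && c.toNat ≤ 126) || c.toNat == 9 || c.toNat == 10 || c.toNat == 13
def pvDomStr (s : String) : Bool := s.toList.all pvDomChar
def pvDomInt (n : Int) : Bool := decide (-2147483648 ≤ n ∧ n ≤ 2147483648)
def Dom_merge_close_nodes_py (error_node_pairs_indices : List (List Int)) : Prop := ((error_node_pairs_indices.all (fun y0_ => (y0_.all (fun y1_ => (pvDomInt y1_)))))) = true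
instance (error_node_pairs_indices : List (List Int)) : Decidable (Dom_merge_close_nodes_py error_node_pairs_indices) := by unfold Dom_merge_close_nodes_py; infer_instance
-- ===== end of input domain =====

-- B replaces A's rebuild-the-list-and-recheck loop by a single greedy left-to-right
-- pass extending the last group of an output list; same return value on Pre_.

-- ===== PORT A =====
-- A's while loop, step for step; fuel only makes the recursion total (each iteration
-- consumes one element to the right of i, so len(list)+1 fuel is never exhausted on
-- inputs where the Python loop terminates); none = the Python raised (IndexError).
def mergeALoop : Nat → List (List Int) → Int → Option (List (List Int))
  | 0, _, _ => none
  | fuel + 1, l, i =>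
    if i < (l.length : Int) - 1 then
      match PySem.List.pyGet? l (i + 1) with
      | none => none
      | some nxt =>
        match PySem.List.pyGet? nxt 1 with
        | none => none
        | some v1 =>
          match PySem.List.pyGet? l i with
          | none => none
          | some cur =>
            match PySem.List.pyGet? cur 0 with
            | none => none
            | some v0 =>
              if v1 - v0 < 10 then
                mergeALoop fuel
                  (PySem.List.slice l none (some i) ++ [[v0, v1]] ++
                    PySem.List.slice l (some (i + 2)) none)
                  (i - 1 + 1)
              else
                mergeALoop fuel l (i + 1)
    else some l

def merge_close_nodes_py (error_node_pairs_indices : List (List Int)) : List (List Int) :=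
  (mergeALoop (error_node_pairs_indices.length + 1) error_node_pairs_indices 0).getD []

-- ===== PORT B =====
-- mergeBStep is one step of Source B's for-loop; none = the Python raised (IndexError)
def mergeBStep (acc : Option (List (List Int))) (pair : List Int) : Option (List (List Int)) :=
  match acc with
  | none => none
  | some merged =>
    if merged.isEmpty then some (merged ++ [pair])
    else
      match PySem.List.pyGet? pair 1 with
      | none => none
      | some p1 =>
        match PySem.List.pyGet? merged (-1) with
        | none => none
        | some last =>
          match PySem.List.pyGet? last 0 with
          | none => none
          | some l0 =>
            if p1 - l0 < 10 then some (merged.dropLast ++ [[l0, p1]])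
            else some (merged ++ [pair])

def merge_close_nodes_py_alt (error_node_pairs_indices : List (List Int)) : List (List Int) :=
  (error_node_pairs_indices.foldl mergeBStep (some [])).getD []

-- ===== PRECONDITION & SPEC =====
-- Pre_ excludes exactly the inputs on which the Python A raises an IndexError
-- (with two or more pairs: an empty first pair, or a later pair shorter than 2);
-- B raises an IndexError on exactly the same inputs.
def Pre_merge_close_nodes_py (error_node_pairs_indices : List (List Int)) : Prop :=
  error_node_pairs_indices.length ≤ 1 ∨
    ((∀ y ∈ error_node_pairs_indices.take 1, 1 ≤ y.length) ∧
     (∀ y ∈ error_node_pairs_indices.drop 1, 2 ≤ y.length))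
instance (error_node_pairs_indices : List (List Int)) : Decidable (Pre_merge_close_nodes_py error_node_pairs_indices) := by unfold Pre_merge_close_nodes_py; infer_instance

def pvWitness_merge_close_nodes_py : List (List Int) := [[0, 20], [15, 22], [40, 45]]

def Spec_merge_close_nodes_py (error_node_pairs_indices : List (List Int)) (out : List (List Int)) : Prop := out = merge_close_nodes_py_alt error_node_pairs_indices
instance (error_node_pairs_indices : List (List Int)) (out : List (List Int)) : Decidable (Spec_merge_close_nodes_py error_node_pairs_indices out) := by unfold Spec_merge_close_nodes_py; infer_instance

-- ===== CLAIM (what is proved, stated in full; the proofs are below) =====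
def Claim_equal_merge_close_nodes_py : Prop := ∀ (error_node_pairs_indices : List (List Int)), Dom_merge_close_nodes_py error_node_pairs_indices → Pre_merge_close_nodes_py error_node_pairs_indices → Spec_merge_close_nodes_py error_node_pairs_indices (merge_close_nodes_py error_node_pairs_indices)

-- ===== LEMMAS AND PROOFS =====

-- The heart of the equivalence: A's state after it has settled a nonempty prefix m
-- (its index i pointing at the last element of m) computes exactly what B's fold
-- computes from accumulator m over the remaining original elements.
lemma mergeALoop_eq_fold (rest : List (List Int)) :
    ∀ (m : List (List Int)) (fuel : Nat), rest.length + 1 ≤ fuel → m ≠ [] →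
      1 ≤ (m.getLast?.getD []).length → (∀ y ∈ rest, 2 ≤ y.length) →
      mergeALoop fuel (m ++ rest) ((m.length : Int) - 1) = rest.foldl mergeBStep (some m) := by
  induction rest with
  | nil =>
    intro m fuel hfuel hm hlast hrest
    obtain ⟨f, rfl⟩ : ∃ f, fuel = f + 1 := ⟨fuel - 1, by omega⟩
    simp [mergeALoop]
  | cons e rest' ih =>
    intro m fuel hfuel hm hlast hrest
    obtain ⟨f, rfl⟩ : ∃ f, fuel = f + 1 := ⟨fuel - 1, by omega⟩
    obtain ⟨m', x, rfl⟩ : ∃ m' x, m = m' ++ [x] := by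
      rcases List.eq_nil_or_concat m with h | ⟨m', a, h⟩
      · exact absurd h hm
      · exact ⟨m', a, by simpa [List.concat_eq_append] using h⟩
    have hx : 1 ≤ x.length := by simpa using hlast
    have he : 2 ≤ e.length := hrest e (by simp)
    have hlen : ((m' ++ [x]).length : Int) - 1 = (m'.length : Int) := by simp
    have hcond : ((m'.length : Int)) < (((m' ++ [x]) ++ e :: rest').length : Int) - 1 := by
      simp; omega
    have hget1 : PySem.List.pyGet? ((m' ++ [x]) ++ e :: rest') ((m'.length : Int) + 1) = some e := by
      have : ((m'.length : Int) + 1) = (((m' ++ [x]).length : Int)) := by simp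
      rw [this]
      exact PySem.List.pyGet?_append_length _ _ _
    obtain ⟨v1, hgete1⟩ : ∃ v, PySem.List.pyGet? e 1 = some v := by
      have h1 := PySem.List.pyGet?_of_nonneg (xs := e) (i := 1) (by omega)
      rw [h1, List.getElem?_eq_getElem (by simp; omega)]
      exact ⟨_, rfl⟩
    have hgetx : PySem.List.pyGet? ((m' ++ [x]) ++ e :: rest') ((m'.length : Int)) = some x := by
      have : (m' ++ [x]) ++ e :: rest' = m' ++ (x :: e :: rest') := by simp
      rw [this]
      exact PySem.List.pyGet?_append_length _ _ _
    obtain ⟨v0, hgetx0⟩ : ∃ v, PySem.List.pyGet? x 0 = some v := by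
      rw [PySem.List.pyGet?_zero, List.getElem?_eq_getElem (by omega : 0 < x.length)]
      exact ⟨_, rfl⟩
    rw [mergeALoop, hlen, if_pos hcond]
    simp only [hget1, hgete1, hgetx, hgetx0]
    by_cases hmerge : v1 - v0 < 10
    · rw [if_pos hmerge]
      have hsliceL : PySem.List.slice ((m' ++ [x]) ++ e :: rest') none (some (m'.length : Int)) = m' := by
        rw [PySem.List.slice_to_natCast]
        simp
      have hsliceR : PySem.List.slice ((m' ++ [x]) ++ e :: rest') (some ((m'.length : Int) + 2)) none = rest' := by
        have : ((m'.length : Int) + 2) = ((m'.length + 2 : Nat) : Int) := by push_cast; ring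
        rw [this, PySem.List.slice_from_natCast]
        have : (m' ++ [x]) ++ e :: rest' = (m' ++ [x] ++ [e]) ++ rest' := by simp
        rw [this]
        have hl : (m' ++ [x] ++ [e]).length = m'.length + 2 := by simp
        rw [← hl, List.drop_left]
      rw [hsliceL, hsliceR, Int.sub_add_cancel]
      have ihx := ih (m' ++ [[v0, v1]]) f (by simpa using hfuel) (by simp)
        (by simp) (fun y hy => hrest y (by simp [hy]))
      have hli : (((m' ++ [[v0, v1]]).length : Nat) : Int) - 1 = (m'.length : Int) := by
        simp
      rw [hli] at ihx
      have hassoc : m' ++ [[v0, v1]] ++ rest' = (m' ++ [[v0, v1]]) ++ rest' := by simp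
      rw [hassoc, ihx]
      -- B side
      have hb : mergeBStep (some (m' ++ [x])) e = some (m' ++ [[v0, v1]]) := by
        simp [mergeBStep, hgete1, PySem.List.pyGet?_neg_one_append_singleton, hgetx0, hmerge]
      simp [hb]
    · rw [if_neg hmerge]
      have hassoc : (m' ++ [x]) ++ e :: rest' = ((m' ++ [x]) ++ [e]) ++ rest' := by simp
      rw [hassoc]
      have ihx := ih ((m' ++ [x]) ++ [e]) f (by simpa using hfuel) (by simp) (by simp; omega)
        (fun y hy => hrest y (by simp [hy]))
      have hli : ((((m' ++ [x]) ++ [e]).length : Nat) : Int) - 1 = (m'.length : Int) + 1 := by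
        simp
        ring
      rw [hli] at ihx
      rw [ihx]
      have hb : mergeBStep (some (m' ++ [x])) e = some ((m' ++ [x]) ++ [e]) := by
        simp [mergeBStep, hgete1, PySem.List.pyGet?_neg_one_append_singleton, hgetx0, hmerge]
      simp [hb]

theorem merge_close_nodes_py_spec_aux :
    ∀ l, Pre_merge_close_nodes_py l → Spec_merge_close_nodes_py l (merge_close_nodes_py l) := by
  intro l hpre
  unfold Spec_merge_close_nodes_py
  match l with
  | [] => rfl
  | [e] =>
    show (mergeALoop 2 [e] 0).getD [] = _
    rw [show mergeALoop 2 [e] 0 = some [e] from by rw [mergeALoop, if_neg (by simp)]]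
    rfl
  | e :: e' :: tl =>
    have h1 : 1 ≤ e.length ∧ ∀ y ∈ e' :: tl, 2 ≤ y.length := by
      rcases hpre with h | ⟨h1, h2⟩
      · simp at h
      · exact ⟨by simpa using h1, by simpa using h2⟩
    have key := mergeALoop_eq_fold (e' :: tl) [e] ((e :: e' :: tl).length + 1)
      (by simp) (by simp) (by simpa using h1.1) h1.2
    unfold merge_close_nodes_py merge_close_nodes_py_alt
    rw [show ([e] : List (List Int)) ++ e' :: tl = e :: e' :: tl from rfl] at key
    rw [show (((([e] : List (List Int))).length : Int) - 1) = 0 from by simp] at key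
    rw [key]
    have hstep : mergeBStep (some []) e = some [e] := by simp [mergeBStep]
    simp [hstep]

-- ===== VERDICT (by name: the statement is the Claim_ definition above) =====
theorem merge_close_nodes_py_spec : Claim_equal_merge_close_nodes_py := by
  intro l _ hpre
  exact merge_close_nodes_py_spec_aux l hpre
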